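-- pv_equiv track=rewrite | github.com/turtlecoder207/Python-Practice | testing1.py | find_message
-- ===== SOURCE A (Python) =====
-- def find_message(string):
--     #문장을 띄어쓰기대로 나눠서 리스트 형식으로 보관한다.
--     string_list = string.split()
--
--
--     i = 0
--     j = 0
--     result = " "
--
--     #나눈 단어의 한 글자씩 대문자인지 확인한다.
--     #리스트(단어) 접근을 위한 for 문
--     for i in range(len(string_list)):
--         #리스트의 각 글자(단어의 각 글자) 접근을 위한 for 문
--         for j in range(len(string_list[i])):
--             #해당 리스트의 글자가 대문자이면, result에 추가
--             if string_list[i][j].isupper():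
--                 result  = result + string_list[i][j]
--
--     return result
-- ===== SOURCE B (Python) =====
-- def find_message(string):
--     return " " + "".join(c for c in string if c.isupper())
-- ===== Notes on version B (the rewrite author's own statement) =====
-- stated objective: simpler
-- what changed: Drops the split-into-words step and the two nested index loops: B makes a single pass over the raw characters, joining the uppercase ones after the literal leading space (whitespace is never uppercase, so the word grouping is irrelevant).
import Mathlib
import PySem

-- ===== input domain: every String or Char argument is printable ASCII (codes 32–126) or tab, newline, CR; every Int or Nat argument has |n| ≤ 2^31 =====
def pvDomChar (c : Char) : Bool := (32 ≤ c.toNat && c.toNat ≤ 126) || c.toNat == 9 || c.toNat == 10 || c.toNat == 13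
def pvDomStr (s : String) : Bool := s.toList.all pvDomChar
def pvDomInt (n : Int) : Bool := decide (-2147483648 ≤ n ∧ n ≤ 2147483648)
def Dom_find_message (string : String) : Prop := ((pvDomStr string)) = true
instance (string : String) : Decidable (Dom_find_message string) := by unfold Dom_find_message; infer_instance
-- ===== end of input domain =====

-- B drops the split and the two nested index loops: one pass over the raw characters (simpler, same cost).

-- ===== PORT A =====
def find_message (string : String) : String :=
  let string_list := PySem.Str.split₀ string
  let result : List Char :=
    (PySem.List.pyRange 0 (string_list.length : Int)).foldl (fun result i =>
      (PySem.List.pyRange 0 ((PySem.List.pyGetD string_list i "").toList.length : Int)).foldl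
        (fun result j =>
          if PySem.Chars.isupper (PySem.List.pyGetD (PySem.List.pyGetD string_list i "").toList j ' ') then
            result ++ [PySem.List.pyGetD (PySem.List.pyGetD string_list i "").toList j ' ']
          else result) result) [' ']
  String.ofList result

-- ===== PORT B =====
def find_message_alt (string : String) : String :=
  String.ofList (' ' :: string.toList.filter PySem.Chars.isupper)

-- ===== PRECONDITION & SPEC =====
def Spec_find_message (string : String) (out : String) : Prop := out = find_message_alt string
instance (string : String) (out : String) : Decidable (Spec_find_message string out) := by unfold Spec_find_message; infer_instance

-- ===== CLAIM (what is proved, stated in full; the proofs are below) =====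
def Claim_equal_find_message : Prop := ∀ (string : String), Dom_find_message string → Spec_find_message string (find_message string)

-- ===== LEMMAS AND PROOFS =====

-- an uppercase letter is never whitespace
theorem isupper_of_isspace (c : Char) (h : PySem.Chars.isspace c = true) :
    PySem.Chars.isupper c = false := by
  simp only [PySem.Chars.isspace, decide_eq_true_eq, Bool.or_eq_true, Bool.and_eq_true] at h
  simp only [PySem.Chars.isupper, Bool.and_eq_false_iff, decide_eq_false_iff_not, Char.le_def,
    UInt32.le_iff_toNat_le, Char.toNat, show ('A').val.toNat = 65 from rfl,
    show ('Z').val.toNat = 90 from rfl] at h ⊢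
  omega

-- collecting uppercase letters word by word over split() equals filtering the raw characters
theorem go_filter_isupper (s cur : List Char) (acc : List (List Char)) :
    (PySem.Chars.split₀.go s cur acc).flatMap (List.filter PySem.Chars.isupper)
      = acc.reverse.flatMap (List.filter PySem.Chars.isupper)
        ++ cur.reverse.filter PySem.Chars.isupper ++ s.filter PySem.Chars.isupper := by
  induction s generalizing cur acc with
  | nil =>
    by_cases h : cur.isEmpty
    · simp [PySem.Chars.split₀.go, List.isEmpty_iff.mp h]
    · simp [PySem.Chars.split₀.go, h, List.flatMap_append]
  | cons c rest ih =>
    by_cases hs : PySem.Chars.isspace c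
    · have hu := isupper_of_isspace c hs
      by_cases h : cur.isEmpty
      · simp [PySem.Chars.split₀.go, hs, ih, List.isEmpty_iff.mp h, hu]
      · simp [PySem.Chars.split₀.go, hs, h, ih, List.flatMap_append, hu, List.append_assoc]
    · simp only [PySem.Chars.split₀.go, hs, if_false, Bool.false_eq_true, ih,
        List.reverse_cons, List.filter_append, List.filter_cons]
      by_cases hu : PySem.Chars.isupper c <;> simp [hu, List.append_assoc]

theorem split₀_filter_isupper (cs : List Char) :
    (PySem.Chars.split₀ cs).flatMap (List.filter PySem.Chars.isupper)
      = cs.filter PySem.Chars.isupper := by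
  simpa using go_filter_isupper cs [] []

-- A's inner index loop over one word collects that word's uppercase letters
theorem inner_loop (w : String) (acc : List Char) :
    (PySem.List.pyRange 0 (w.toList.length : Int)).foldl
      (fun result j =>
        if PySem.Chars.isupper (PySem.List.pyGetD w.toList j ' ') then
          result ++ [PySem.List.pyGetD w.toList j ' ']
        else result) acc
      = acc ++ w.toList.filter PySem.Chars.isupper := by
  rw [PySem.List.foldl_pyRange_zero_pyGetD' w.toList ' '
    (fun acc c => if PySem.Chars.isupper c then acc ++ [c] else acc) acc]
  exact PySem.List.foldl_append_if_eq_filter _ _ _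

-- A's outer loop over the word list concatenates the per-word collections
theorem outer_loop (ws : List String) (acc : List Char) :
    ws.foldl (fun result w =>
      (PySem.List.pyRange 0 (w.toList.length : Int)).foldl
        (fun result j =>
          if PySem.Chars.isupper (PySem.List.pyGetD w.toList j ' ') then
            result ++ [PySem.List.pyGetD w.toList j ' ']
          else result) result) acc
      = acc ++ ws.flatMap (fun w => w.toList.filter PySem.Chars.isupper) := by
  induction ws generalizing acc with
  | nil => simp
  | cons w ws ih =>
    rw [List.foldl_cons, inner_loop, ih, List.flatMap_cons, List.append_assoc]

-- ===== VERDICT (by name: the statement is the Claim_ definition above) =====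
theorem find_message_spec : Claim_equal_find_message := by
  intro s _
  show find_message s = find_message_alt s
  simp only [find_message, find_message_alt]
  rw [PySem.List.foldl_pyRange_zero_pyGetD' (PySem.Str.split₀ s) ""
    (fun result w =>
      (PySem.List.pyRange 0 (w.toList.length : Int)).foldl
        (fun result j =>
          if PySem.Chars.isupper (PySem.List.pyGetD w.toList j ' ') then
            result ++ [PySem.List.pyGetD w.toList j ' ']
          else result) result) [' ']]
  rw [outer_loop]
  have h : (PySem.Str.split₀ s).flatMap (fun w => w.toList.filter PySem.Chars.isupper)
      = s.toList.filter PySem.Chars.isupper := by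
    rw [show (PySem.Str.split₀ s).flatMap (fun w => w.toList.filter PySem.Chars.isupper)
          = ((PySem.Str.split₀ s).map String.toList).flatMap (List.filter PySem.Chars.isupper) from
        (List.flatMap_map _ _ _).symm,
      PySem.Str.split₀_map_toList, split₀_filter_isupper]
  rw [h]
  rfl
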